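-- pv_equiv track=rewrite | github.com/HomeSox/AtCoder | satory074/arc142/a/main.py | f
-- ===== SOURCE A (Python) =====
-- def reverse_number(n):
--     return int(str(n)[::-1])
--
-- def f(x):
--     min_x = x
--     seen = set()
--     while x not in seen:
--         seen.add(x)
--         min_x = min(min_x, x)
--         x = reverse_number(x)
--     return min_x
-- ===== SOURCE B (Python) =====
-- def reverse_number(n):
--     return int(str(n)[::-1])
--
--
-- def f(x):
--     # The reversal orbit of x stabilises after one step: reversing strips
--     # trailing zeros, so rev(rev(rev(x))) == rev(x).  Hence the loop in the
--     # original only ever sees x, rev(x) and rev(rev(x)).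
--     r = reverse_number(x)
--     return min(x, r, reverse_number(r))
-- ===== Notes on version B (the rewrite author's own statement) =====
-- stated objective: simpler
-- what changed: Replaced the cycle-detecting while-loop with a seen-set by a closed form: since reversing strips trailing zeros, rev(rev(rev(x))) = rev(x), so the orbit is {x, rev(x), rev(rev(x))} and B returns min of those three values directly.
import Mathlib
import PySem

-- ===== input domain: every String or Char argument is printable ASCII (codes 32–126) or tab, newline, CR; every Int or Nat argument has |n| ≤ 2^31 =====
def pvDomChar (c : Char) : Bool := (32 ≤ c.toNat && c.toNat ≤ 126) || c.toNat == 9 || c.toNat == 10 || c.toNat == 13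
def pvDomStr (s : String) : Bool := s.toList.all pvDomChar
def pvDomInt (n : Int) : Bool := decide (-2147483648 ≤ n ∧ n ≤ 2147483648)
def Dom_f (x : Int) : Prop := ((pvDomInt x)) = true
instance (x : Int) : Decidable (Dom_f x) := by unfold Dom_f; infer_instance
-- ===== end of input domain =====

-- B replaces A's cycle-detecting while-loop (seen set) by the closed form
-- min(x, rev(x), rev(rev(x))); same return value on every x ≥ 0 (both raise
-- ValueError on negative x, excluded by Pre_f).

-- ===== PORT A =====

-- shared module helper: reverse_number(n) = int(str(n)[::-1]); none = ValueError
def revNum? (n : Int) : Option Int :=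
  (PySem.Str.slice? (PySem.Int.toStr n) none none (-1)).bind fun t => PySem.Int.ofStr? t

-- the while-loop of A; fuel is only a divergence guard (the orbit of the
-- reversal map repeats within 4 steps, proved below); 0 on ValueError,
-- excluded by Pre_f
def fLoop : Nat → Int → Int → PySem.Set Int → Int
  | 0, _, minx, _ => minx
  | fuel + 1, x, minx, seen =>
    if PySem.Set.contains seen x then minx
    else
      match revNum? x with
      | none => 0
      | some x' => fLoop fuel x' (min minx x) (PySem.Set.add seen x)

def f (x : Int) : Int := fLoop 100 x x PySem.Set.empty

-- ===== PORT B =====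
def f_alt (x : Int) : Int :=
  match revNum? x with
  | none => 0
  | some r =>
    match revNum? r with
    | none => 0
    | some rr => min (min x r) rr

-- ===== PRECONDITION & SPEC =====
-- Python A raises ValueError on negative x (int("…-") fails); B raises the same.
def Pre_f (x : Int) : Prop := 0 ≤ x
instance (x : Int) : Decidable (Pre_f x) := by unfold Pre_f; infer_instance

def pvWitness_f : Int := 1200

def Spec_f (x : Int) (out : Int) : Prop := out = f_alt x
instance (x : Int) (out : Int) : Decidable (Spec_f x out) := by unfold Spec_f; infer_instance

-- ===== CLAIM (what is proved, stated in full; the proofs are below) =====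
def Claim_equal_f : Prop := ∀ (x : Int), Dom_f x → Pre_f x → Spec_f x (f x)

-- ===== LEMMAS AND PROOFS =====

-- ---- value of Python's int() on a list of decimal digit characters ----

def cv (c : Char) : Nat := c.toNat - 48

def valChars (acc : Nat) (ds : List Char) : Nat := ds.foldl (fun a c => a * 10 + cv c) acc

theorem goSpec (g : List Char → Bool → Nat → Option Nat)
    (h0 : ∀ a acc, g [] a acc = if a then some acc else none)
    (h1 : ∀ c rest a acc, g (c :: rest) a acc =
      if c.isDigit then g rest true (acc * 10 + (c.toNat - '0'.toNat))
      else
        if c = '_' ∧ a = true then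
          (match rest with
           | d :: _ => if d.isDigit then g rest false acc else none
           | [] => none)
        else none) :
    ∀ t acc, (∀ c ∈ t, c.isDigit) → g t true acc = some (valChars acc t) := by
  intro t
  induction t with
  | nil => intro acc h; simp [h0, valChars]
  | cons c rest ih =>
    intro acc h
    rw [h1]
    have hc : c.isDigit := h c (by simp)
    rw [if_pos hc, ih _ (fun d hd => h d (by simp [hd]))]
    simp [valChars, cv]

-- the digit-scanning loop inside PySem.Int.ofChars? is private; it is captured
-- here by its defining equations (discharged by rfl at the use site)
theorem goMain (dv : List Char → Option Nat) (g : List Char → Bool → Nat → Option Nat)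
    (hdv : dv = fun ds => match ds with
      | [] => none
      | cs => g cs false 0)
    (h0 : ∀ a acc, g [] a acc = if a then some acc else none)
    (h1 : ∀ c rest a acc, g (c :: rest) a acc =
      if c.isDigit then g rest true (acc * 10 + (c.toNat - '0'.toNat))
      else
        if c = '_' ∧ a = true then
          (match rest with
           | d :: _ => if d.isDigit then g rest false acc else none
           | [] => none)
        else none)
    (c : Char) (t : List Char) (h : ∀ d ∈ c :: t, d.isDigit) :
    Option.map (fun n : Int => n) ((dv (c :: t)).bind fun a => pure ((a : Nat) : Int)) = some ((valChars 0 (c :: t) : Nat) : Int) := by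
  have hc : c.isDigit := h c (by simp)
  rw [hdv]
  show Option.map (fun n : Int => n) ((g (c :: t) false 0).bind fun a => pure ((a : Nat) : Int)) = _
  rw [h1, if_pos hc, goSpec g h0 h1 t _ (fun d hd => h d (by simp [hd]))]
  simp [valChars, cv]

theorem notSpace_of_digit (d : Char) (hd : d.isDigit) : PySem.Int.isIntSpace d = false := by
  have hv : 48 ≤ d.toNat ∧ d.toNat ≤ 57 := by simpa [Char.isDigit] using hd
  simp only [PySem.Int.isIntSpace, Bool.or_eq_false_iff, decide_eq_false_iff_not]
  refine ⟨⟨⟨⟨⟨?_, ?_⟩, ?_⟩, ?_⟩, ?_⟩, ?_⟩ <;>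
    (intro he; rw [he] at hv; simp [Char.toNat] at hv)

theorem ofChars?_digits (c : Char) (t : List Char) (h : ∀ d ∈ c :: t, d.isDigit) :
    PySem.Int.ofChars? (c :: t) = some ((valChars 0 (c :: t) : Nat) : Int) := by
  have hc : c.isDigit := h c (by simp)
  have hd1 : List.dropWhile PySem.Int.isIntSpace (c :: t) = c :: t :=
    List.dropWhile_cons_of_neg (by simp [notSpace_of_digit c hc])
  have hd2 : List.dropWhile PySem.Int.isIntSpace ((c :: t).reverse) = (c :: t).reverse := by
    apply List.dropWhile_eq_self_iff.mpr
    intro hne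
    rw [Bool.not_eq_true, notSpace_of_digit]
    apply h
    rw [← List.mem_reverse]
    exact List.getElem_mem hne
  have hcm : c ≠ '-' := by rintro rfl; simp [Char.isDigit] at hc
  have hcp : c ≠ '+' := by rintro rfl; simp [Char.isDigit] at hc
  unfold PySem.Int.ofChars?
  simp only [hd1, hd2, List.reverse_reverse]
  split
  · next heq => rw [List.cons.injEq] at heq; exact absurd heq.1 hcm
  · next heq => rw [List.cons.injEq] at heq; exact absurd heq.1 hcp
  · apply goMain (c := c) (t := t) (h := h)
    case hdv => rfl
    case h0 => intro a acc; rfl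
    case h1 => intro c' r a acc; rfl

-- ---- arithmetic characterisation of one reversal ----

-- decimal reversal, via the string: valChars over the reversed digit chars
def revStrNat (m : Nat) : Nat := valChars 0 ((Nat.toDigits 10 m).reverse)

-- decimal reversal, arithmetically
def revNat (m : Nat) : Nat := Nat.ofDigits 10 (Nat.digits 10 m).reverse

theorem valChars_eq (ds : List Char) :
    ∀ acc, valChars acc ds = acc * 10 ^ ds.length + Nat.ofDigits 10 ((ds.map cv).reverse) := by
  induction ds with
  | nil => intro acc; simp [valChars]
  | cons c t ih =>
    intro acc
    show valChars (acc * 10 + cv c) t = _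
    rw [ih (acc * 10 + cv c), List.map_cons, List.reverse_cons, Nat.ofDigits_append]
    simp [Nat.ofDigits]
    ring

theorem toDigits_eq : ∀ m : Nat, 0 < m →
    Nat.toDigits 10 m = ((Nat.digits 10 m).map Nat.digitChar).reverse := by
  intro m
  induction m using Nat.strong_induction_on with
  | _ m ih =>
    intro hm
    by_cases h10 : m < 10
    · rw [Nat.toDigits_of_lt_base h10, Nat.digits_def' (by norm_num) hm,
        Nat.div_eq_of_lt h10, Nat.mod_eq_of_lt h10]
      simp
    · rw [Nat.toDigits_of_base_le (by norm_num) (le_of_not_gt h10),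
        Nat.digits_def' (by norm_num) hm,
        ih (m / 10) (Nat.div_lt_self hm (by norm_num))
          (Nat.div_pos (le_of_not_gt h10) (by norm_num))]
      simp

theorem cv_digitChar (d : Nat) (hd : d < 10) : cv d.digitChar = d := by
  interval_cases d <;> rfl

theorem revStrNat_eq (m : Nat) : revStrNat m = revNat m := by
  rcases Nat.eq_zero_or_pos m with rfl | hm
  · rfl
  · have hmap : ((Nat.digits 10 m).map Nat.digitChar).map cv = Nat.digits 10 m := by
      rw [List.map_map]
      calc (Nat.digits 10 m).map (cv ∘ Nat.digitChar)
          = (Nat.digits 10 m).map id :=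
            List.map_congr_left fun d hd => cv_digitChar d (Nat.digits_lt_base (by norm_num) hd)
        _ = Nat.digits 10 m := List.map_id _
    rw [revStrNat, toDigits_eq m hm, List.reverse_reverse, valChars_eq, hmap]
    simp [revNat]

theorem ofDigits_replicate_zero (k : Nat) : Nat.ofDigits 10 (List.replicate k 0) = 0 := by
  induction k with
  | zero => rfl
  | succ n ih => rw [List.replicate_succ, Nat.ofDigits_cons, ih]

-- trailing zeros of a nonzero number: its digit list splits as zeros ++ K
theorem digits_decomp : ∀ (L : List Nat), L ≠ [] → L.getLast? ≠ some 0 →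
    ∃ k K, K ≠ [] ∧ L = List.replicate k 0 ++ K ∧ K.head? ≠ some 0 ∧ K.getLast? = L.getLast? := by
  intro L
  induction L with
  | nil => intro h; exact absurd rfl h
  | cons c t ih =>
    intro _ hlast
    by_cases hc : c = 0
    · subst hc
      match t, hlast with
      | [], hlast => exact absurd rfl hlast
      | x :: xs, hlast =>
        have hlast' : (x :: xs).getLast? ≠ some 0 := by
          rwa [List.getLast?_cons_cons] at hlast
        obtain ⟨k, K, hK, hsplit, hhd, hlK⟩ := ih (List.cons_ne_nil x xs) hlast'
        exact ⟨k + 1, K, hK, by rw [List.replicate_succ, List.cons_append, ← hsplit],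
          hhd, by rw [hlK, List.getLast?_cons_cons]⟩
    · exact ⟨0, c :: t, List.cons_ne_nil c t, by simp, by simp [hc], rfl⟩

-- the orbit of decimal reversal repeats after one step
theorem revNat_revNat_revNat (m : Nat) : revNat (revNat (revNat m)) = revNat m := by
  rcases Nat.eq_zero_or_pos m with rfl | hm
  · rfl
  have hL : Nat.digits 10 m ≠ [] := Nat.digits_ne_nil_iff_ne_zero.mpr hm.ne'
  have hlast : (Nat.digits 10 m).getLast? ≠ some 0 := by
    rw [List.getLast?_eq_some_getLast hL]
    intro h
    exact Nat.getLast_digit_ne_zero 10 hm.ne' (Option.some.inj h)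
  obtain ⟨k, K, hK, hsplit, hhd, hlK⟩ := digits_decomp (Nat.digits 10 m) hL hlast
  have hKlt : ∀ d ∈ K, d < 10 := by
    intro d hd
    exact Nat.digits_lt_base (by norm_num) (by rw [hsplit]; exact List.mem_append_right _ hd)
  have hKlast : K.getLast? ≠ some 0 := by rw [hlK]; exact hlast
  have hKrev : K.reverse ≠ [] := by simpa using hK
  -- step 1: revNat m = ofDigits 10 K.reverse
  have s1 : revNat m = Nat.ofDigits 10 K.reverse := by
    rw [revNat, hsplit, List.reverse_append, List.reverse_replicate,
      Nat.ofDigits_append, ofDigits_replicate_zero]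
    ring
  -- step 2: the digits of revNat m are exactly K.reverse
  have s2 : Nat.digits 10 (Nat.ofDigits 10 K.reverse) = K.reverse := by
    apply Nat.digits_ofDigits 10 (by norm_num)
    · intro d hd; exact hKlt d (List.mem_reverse.mp hd)
    · intro h
      rw [List.getLast_reverse]
      intro h0
      exact hhd (by rw [List.head?_eq_some_head hK, h0])
  -- step 3: revNat (revNat m) = ofDigits 10 K
  have s3 : revNat (revNat m) = Nat.ofDigits 10 K := by
    rw [s1, revNat, s2, List.reverse_reverse]
  -- step 4: the digits of revNat (revNat m) are exactly K
  have s4 : Nat.digits 10 (Nat.ofDigits 10 K) = K := by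
    apply Nat.digits_ofDigits 10 (by norm_num)
    · exact hKlt
    · intro h h0
      exact hKlast (by rw [List.getLast?_eq_some_getLast h, h0])
  rw [s3, revNat, s4, ← s1]

-- ---- the Lean port of reverse_number on nonnegative input ----

theorem revNum?_spec (m : Nat) : revNum? (m : Int) = some ((revNat m : Nat) : Int) := by
  rw [revNum?]
  rw [PySem.Str.slice?_none_none_neg_one, Option.bind_some]
  rw [PySem.Int.ofStr?_ofList, PySem.Int.toList_toStr]
  have htc : PySem.Int.toChars (m : Int) = Nat.toDigits 10 m := by
    rw [PySem.Int.toChars]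
    simp
  rw [htc]
  have hne : (Nat.toDigits 10 m).reverse ≠ [] := by
    simp only [ne_eq, List.reverse_eq_nil_iff]
    intro h
    have := @Nat.length_toDigits_pos 10 m
    rw [h] at this
    simp at this
  obtain ⟨c, t, hct⟩ := List.exists_cons_of_ne_nil hne
  rw [hct]
  rw [ofChars?_digits c t (by
    intro d hd
    rw [← hct] at hd
    exact Nat.isDigit_of_mem_toDigits (by norm_num) (by norm_num) (List.mem_reverse.mp hd))]
  rw [← hct]
  rw [show valChars 0 ((Nat.toDigits 10 m).reverse) = revNat m from revStrNat_eq m]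

-- ---- the loop of A returns the three-term minimum ----

theorem set_lemmas_contains_empty (x : Int) : PySem.Set.contains (PySem.Set.empty) x = false := by
  rfl

theorem fLoop_eq (x : Int) (hx : 0 ≤ x) : fLoop 100 x x PySem.Set.empty = f_alt x := by
  have hxn : x = ((x.toNat : Nat) : Int) := (Int.toNat_of_nonneg hx).symm
  set n := x.toNat with hn
  have h1 : revNum? x = some ((revNat n : Nat) : Int) := by rw [hxn]; exact revNum?_spec n
  have h2 : revNum? ((revNat n : Nat) : Int) = some ((revNat (revNat n) : Nat) : Int) :=
    revNum?_spec (revNat n)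
  have h3 : revNum? ((revNat (revNat n) : Nat) : Int) = some ((revNat n : Nat) : Int) := by
    rw [revNum?_spec (revNat (revNat n)), revNat_revNat_revNat]
  set x1 : Int := ((revNat n : Nat) : Int) with hx1
  set x2 : Int := ((revNat (revNat n) : Nat) : Int) with hx2
  have hB : f_alt x = min (min x x1) x2 := by
    rw [f_alt, h1]
    show (match revNum? x1 with
      | none => 0
      | some rr => min (min x x1) rr) = _
    rw [h2]
  rw [hB]
  -- unfold the loop four levels
  rw [show (100 : Nat) = 99 + 1 from rfl, fLoop.eq_2]
  rw [if_neg (by rw [set_lemmas_contains_empty]; simp)]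
  simp only [h1, min_self]
  rw [show (99 : Nat) = 98 + 1 from rfl, fLoop.eq_2]
  by_cases e1 : x1 = x
  · -- orbit already repeats: x1 = x, hence x2 = revNat n = x as well
    have hcont : PySem.Set.contains (PySem.Set.add PySem.Set.empty x) x1 = true := by
      rw [e1]
      simp [PySem.Set.add, PySem.Set.contains, PySem.Set.empty]
    rw [if_pos hcont]
    have hr : revNat n = n := by
      have h' : ((revNat n : Nat) : Int) = ((n : Nat) : Int) := by rw [← hx1, e1, hxn]
      exact_mod_cast h'
    have hx2x1 : x2 = x1 := by
      rw [hx2, hx1]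
      exact_mod_cast congrArg revNat hr
    rw [e1, hx2x1, e1, min_self, min_self]
  · have hcont : PySem.Set.contains (PySem.Set.add PySem.Set.empty x) x1 = false := by
      simp [PySem.Set.add, PySem.Set.contains, PySem.Set.empty]
      exact e1
    rw [if_neg (by rw [hcont]; simp)]
    simp only [h2]
    rw [show (98 : Nat) = 97 + 1 from rfl, fLoop.eq_2]
    by_cases e2 : x2 = x
    · have hcont2 : PySem.Set.contains (PySem.Set.add (PySem.Set.add PySem.Set.empty x) x1) x2 = true := by
        simp [PySem.Set.add, PySem.Set.contains, PySem.Set.empty, e1, e2]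
      rw [if_pos hcont2, e2, min_eq_left (min_le_left x x1)]
    · by_cases e3 : x2 = x1
      · have hcont2 : PySem.Set.contains (PySem.Set.add (PySem.Set.add PySem.Set.empty x) x1) x2 = true := by
          simp [PySem.Set.add, PySem.Set.contains, PySem.Set.empty, e1, e3]
        rw [if_pos hcont2, e3, min_eq_left (min_le_right x x1)]
      · have hcont2 : PySem.Set.contains (PySem.Set.add (PySem.Set.add PySem.Set.empty x) x1) x2 = false := by
          simp [PySem.Set.add, PySem.Set.contains, PySem.Set.empty, e1, e2, e3]
        rw [if_neg (by rw [hcont2]; simp)]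
        simp only [h3]
        rw [show (97 : Nat) = 96 + 1 from rfl, fLoop.eq_2]
        have hcont3 : PySem.Set.contains
            (PySem.Set.add (PySem.Set.add (PySem.Set.add PySem.Set.empty x) x1) x2) x1 = true := by
          simp [PySem.Set.add, PySem.Set.contains, PySem.Set.empty, e1, e2, e3]
        rw [if_pos hcont3]

-- ===== VERDICT (by name: the statement is the Claim_ definition above) =====
theorem f_spec : Claim_equal_f := by
  intro x _ hpre
  show f x = f_alt x
  rw [show f x = fLoop 100 x x PySem.Set.empty from rfl]
  exact fLoop_eq x hpre
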